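-- pv_equiv track=rewrite | github.com/grosa1/pyszz | szz/core/abstract_szz.py | _parse_line_ranges
-- ===== SOURCE A (Python) =====
-- from typing import List, Set
--
-- def _parse_line_ranges(modified_lines: List) -> List[str]:
--     """
--     Convert impacted lines list to list of modified lines range. In case of single line,
--     the range will be the same line as start and end - ['line_num, line_num', 'start, end', ...]
--
--     :param str modified_lines: list of modified lines
--     :returns List[str] impacted_lines_ranges
--     """
--     mod_line_ranges = list()
--
--     if len(modified_lines) > 0:
--         start = int(modified_lines[0])
--         end = int(modified_lines[0])
--
--         if len(modified_lines) == 1: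
--             return [f'{start},{end}']
--
--         for i in range(1, len(modified_lines)):
--             line = int(modified_lines[i])
--             if line - end == 1:
--                 end = line
--             else:
--                 mod_line_ranges.append(f'{start},{end}')
--                 start = line
--                 end = line
--
--             if i == len(modified_lines) - 1:
--                 mod_line_ranges.append(f'{start},{end}')
--
--     return mod_line_ranges
-- ===== SOURCE B (Python) =====
-- def _parse_line_ranges(modified_lines):
--     # Boundary detection: a run STARTS at the first element or right after a gap,
--     # and ENDS at the last element or right before a gap; zip starts with ends.
--     vals = [int(x) for x in modified_lines]
--     gaps = [(a, b) for a, b in zip(vals, vals[1:]) if b - a != 1]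
--     starts = [b for a, b in gaps]
--     ends = [a for a, b in gaps]
--     if not vals:
--         return []
--     return ['{},{}'.format(s, e) for s, e in zip([vals[0]] + starts, ends + [vals[-1]])]
-- ===== Notes on version B (the rewrite author's own statement) =====
-- stated objective: alternative
-- what changed: Replaces A's stateful run-accumulating loop by gap/boundary detection: filter adjacent pairs for non-consecutive gaps, derive the run-start and run-end lists from the gaps, and zip them into range strings.
import Mathlib
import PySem

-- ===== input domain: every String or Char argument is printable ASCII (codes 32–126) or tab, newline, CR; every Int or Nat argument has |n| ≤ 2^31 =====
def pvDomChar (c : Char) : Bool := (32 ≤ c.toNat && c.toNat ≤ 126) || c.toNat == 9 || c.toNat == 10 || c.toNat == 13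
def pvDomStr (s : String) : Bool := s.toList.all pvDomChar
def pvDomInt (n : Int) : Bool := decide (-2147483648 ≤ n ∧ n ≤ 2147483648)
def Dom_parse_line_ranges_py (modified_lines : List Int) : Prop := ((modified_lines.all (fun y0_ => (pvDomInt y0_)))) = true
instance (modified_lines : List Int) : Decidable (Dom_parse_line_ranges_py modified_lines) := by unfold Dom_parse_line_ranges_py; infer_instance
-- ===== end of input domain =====

-- B replaces A's stateful run-accumulating loop by gap detection over adjacent pairs
-- (run starts = first element + elements after a gap; run ends = elements before a
-- gap + last element; zip the two); objective: alternative decomposition.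

-- ===== PORT A =====
-- f'{start},{end}'
def pvFmt (s e : Int) : String := PySem.Int.toStr s ++ "," ++ PySem.Int.toStr e

-- the for-loop over i = 1 .. len-1; the 'i == len(modified_lines) - 1' final-append
-- branch is the last-iteration case
def pvLoopA (start e : Int) (acc : List String) : List Int → List String
  | [] => acc
  | [l] =>       -- last iteration (i == len - 1): branch, then the final append
    if l - e = 1 then acc ++ [pvFmt start l]
    else (acc ++ [pvFmt start e]) ++ [pvFmt l l]
  | l :: rest =>
    if l - e = 1 then pvLoopA start l acc rest
    else pvLoopA l l (acc ++ [pvFmt start e]) rest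

def parse_line_ranges_py : List Int → List String
  | [] => []
  | [x] => [pvFmt x x]          -- the len == 1 early return
  | x :: rest => pvLoopA x x [] rest

-- ===== PORT B =====
def parse_line_ranges_py_alt (modified_lines : List Int) : List String :=
  let vals := modified_lines
  let gaps := (vals.zip (vals.drop 1)).filter (fun p => p.2 - p.1 ≠ 1)
  let starts := gaps.map Prod.snd
  let ends := gaps.map Prod.fst
  match vals.head?, vals.getLast? with
  | some h, some t => ((h :: starts).zip (ends ++ [t])).map (fun p => pvFmt p.1 p.2)
  | _, _ => []

-- ===== PRECONDITION & SPEC =====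
def Spec_parse_line_ranges_py (modified_lines : List Int) (out : List String) : Prop := out = parse_line_ranges_py_alt modified_lines
instance (modified_lines : List Int) (out : List String) : Decidable (Spec_parse_line_ranges_py modified_lines out) := by unfold Spec_parse_line_ranges_py; infer_instance

-- ===== CLAIM (what is proved, stated in full; the proofs are below) =====
def Claim_equal_parse_line_ranges_py : Prop := ∀ (modified_lines : List Int), Dom_parse_line_ranges_py modified_lines → Spec_parse_line_ranges_py modified_lines (parse_line_ranges_py modified_lines)

-- ===== LEMMAS AND PROOFS =====
-- gaps of the suffix x::xs
def pvGaps (x : Int) (xs : List Int) : List (Int × Int) :=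
  ((x :: xs).zip xs).filter (fun p => p.2 - p.1 ≠ 1)

theorem pvLoopA_eq_gaps (xs : List Int) (hne : xs ≠ []) :
    ∀ (s x : Int) (acc : List String),
      pvLoopA s x acc xs =
        acc ++ (((s :: (pvGaps x xs).map Prod.snd).zip
                  ((pvGaps x xs).map Prod.fst ++ [(x :: xs).getLast (by simp)])).map
                 (fun p => pvFmt p.1 p.2)) := by
  induction xs with
  | nil => exact absurd rfl hne
  | cons l rest ih =>
    intro s x acc
    match rest with
    | [] =>
      simp only [pvLoopA, pvGaps]
      by_cases h : l - x = 1 <;> simp [h]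
    | r :: rs =>
      have hgaps : pvGaps x (l :: r :: rs) =
          (if l - x ≠ 1 then [(x, l)] else []) ++ pvGaps l (r :: rs) := by
        simp only [pvGaps, List.zip_cons_cons, List.filter_cons]
        split_ifs with h <;> simp_all
      have hlast : (x :: l :: r :: rs).getLast (by simp)
          = (l :: r :: rs).getLast (by simp) := by
        simp [List.getLast]
      simp only [pvLoopA]
      by_cases h : l - x = 1
      · rw [if_pos h, ih (by simp) s l acc]
        rw [hgaps, hlast]; simp [h]
      · rw [if_neg h, ih (by simp) l l (acc ++ [pvFmt s x])]
        rw [hgaps, hlast]; simp [h]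

-- ===== VERDICT (by name: the statement is the Claim_ definition above) =====
theorem parse_line_ranges_py_spec : Claim_equal_parse_line_ranges_py := by
  intro xs _
  unfold Spec_parse_line_ranges_py parse_line_ranges_py_alt
  match xs with
  | [] => rfl
  | [x] => simp [parse_line_ranges_py]
  | x :: r :: rs =>
    simp only [parse_line_ranges_py]
    rw [pvLoopA_eq_gaps (r :: rs) (by simp) x x []]
    have : (x :: r :: rs).getLast? = some ((r :: rs).getLast (by simp)) := by
      simp [List.getLast?_eq_some_getLast, List.getLast]
    simp [pvGaps, this]
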